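-- pv_equiv track=rewrite | github.com/audreycode6/L1_PY101_LS | easy1_small_problems/sum_or_product.py | sum_or_product
-- ===== SOURCE A (Python) =====
-- def sum_or_product(number, determine_s_p):
--     if number <= 0:
--         return "Try again! Input must be greater than 0."
--     elif determine_s_p == 's':
--         sum = 0
--         for number in range(1,number+1):
--             sum += number
--         return f"The sum of the integers between 1 and {number} is {sum}!"
--     elif determine_s_p == 'p':
--         product = 1
--         for number in range(1,number+1):
--             product *= number
--         return f"The product of the integers between 1 and {number} is {product}!"
--     else: # not 's' or 'p'
--         return "Try again! Input must be either: 's' OR 'p'!"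
-- ===== SOURCE B (Python) =====
-- def _prod_range(lo, hi):
--     """Product of the integers lo..hi inclusive, by balanced binary splitting."""
--     if lo > hi:
--         return 1
--     if lo == hi:
--         return lo
--     mid = (lo + hi) // 2
--     return _prod_range(lo, mid) * _prod_range(mid + 1, hi)
--
-- def sum_or_product(number, determine_s_p):
--     if number <= 0:
--         return "Try again! Input must be greater than 0."
--     if determine_s_p == 's':
--         return f"The sum of the integers between 1 and {number} is {number * (number + 1) // 2}!"
--     if determine_s_p == 'p':
--         return f"The product of the integers between 1 and {number} is {_prod_range(1, number)}!"
--     return "Try again! Input must be either: 's' OR 'p'!"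
-- ===== Notes on version B (the rewrite author's own statement) =====
-- stated objective: simpler
-- what changed: Replaces the two accumulation loops with direct expressions: the sum branch uses the closed form number*(number+1)//2 and the product branch a recursive factorial helper; no loop state or rebinding of `number`.
import Mathlib
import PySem

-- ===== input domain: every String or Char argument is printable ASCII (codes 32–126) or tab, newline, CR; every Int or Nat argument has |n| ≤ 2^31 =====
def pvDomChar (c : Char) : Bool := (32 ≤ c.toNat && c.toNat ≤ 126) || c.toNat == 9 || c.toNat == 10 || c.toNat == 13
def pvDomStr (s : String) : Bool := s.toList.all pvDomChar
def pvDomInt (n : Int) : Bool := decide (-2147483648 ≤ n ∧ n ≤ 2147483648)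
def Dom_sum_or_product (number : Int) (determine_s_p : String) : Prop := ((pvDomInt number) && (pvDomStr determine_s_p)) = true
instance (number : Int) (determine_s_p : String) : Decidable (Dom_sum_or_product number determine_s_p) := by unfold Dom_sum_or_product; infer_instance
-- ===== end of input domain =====

-- ===== PORT A =====
-- One honest line: B replaces A's two accumulation loops by a closed-form sum and a
-- balanced binary-splitting product; same guard cascade and messages.
def sum_or_product (number : Int) (determine_s_p : String) : String :=
  if number ≤ 0 then
    "Try again! Input must be greater than 0."
  else if determine_s_p == "s" then
    -- `for number in range(1, number+1): sum += number` rebinds the loop variable `number`;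
    -- the fold state is (number, sum).
    let st := (PySem.List.pyRange 1 (number + 1)).foldl
      (fun (p : Int × Int) k => (k, p.2 + k)) (number, 0)
    "The sum of the integers between 1 and " ++ PySem.Int.toStr st.1 ++
      " is " ++ PySem.Int.toStr st.2 ++ "!"
  else if determine_s_p == "p" then
    let st := (PySem.List.pyRange 1 (number + 1)).foldl
      (fun (p : Int × Int) k => (k, p.2 * k)) (number, 1)
    "The product of the integers between 1 and " ++ PySem.Int.toStr st.1 ++
      " is " ++ PySem.Int.toStr st.2 ++ "!"
  else
    "Try again! Input must be either: 's' OR 'p'!"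

-- ===== PORT B =====
-- Source B's `_prod_range`: product of lo..hi inclusive by balanced binary splitting.
def pvProdRange (lo hi : Int) : Int :=
  if lo > hi then 1
  else if lo = hi then lo
  else
    let mid := PySem.Int.floordiv (lo + hi) 2
    pvProdRange lo mid * pvProdRange (mid + 1) hi
termination_by (hi - lo).toNat
decreasing_by
  all_goals
    rename_i h1 h2
    have hle : lo ≤ hi := by omega
    have hb := PySem.Int.floordiv_two_mid_bounds hle
    have hlt : PySem.Int.floordiv (lo + hi) 2 < hi := by
      rw [PySem.Int.floordiv_lt_iff_lt_mul (by omega)]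
      omega
    omega

def sum_or_product_alt (number : Int) (determine_s_p : String) : String :=
  if number ≤ 0 then
    "Try again! Input must be greater than 0."
  else if determine_s_p == "s" then
    "The sum of the integers between 1 and " ++ PySem.Int.toStr number ++
      " is " ++ PySem.Int.toStr (PySem.Int.floordiv (number * (number + 1)) 2) ++ "!"
  else if determine_s_p == "p" then
    "The product of the integers between 1 and " ++ PySem.Int.toStr number ++
      " is " ++ PySem.Int.toStr (pvProdRange 1 number) ++ "!"
  else
    "Try again! Input must be either: 's' OR 'p'!"

-- ===== PRECONDITION & SPEC =====
def Spec_sum_or_product (number : Int) (determine_s_p : String) (out : String) : Prop := out = sum_or_product_alt number determine_s_p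
instance (number : Int) (determine_s_p : String) (out : String) : Decidable (Spec_sum_or_product number determine_s_p out) := by unfold Spec_sum_or_product; infer_instance

-- ===== CLAIM (what is proved, stated in full; the proofs are below) =====
def Claim_equal_sum_or_product : Prop := ∀ (number : Int) (determine_s_p : String), Dom_sum_or_product number determine_s_p → Spec_sum_or_product number determine_s_p (sum_or_product number determine_s_p)

-- ===== LEMMAS AND PROOFS =====

-- Pair-fold of A's sum loop: last loop variable and accumulated sum.
theorem pvPairFoldAdd (xs : List Int) (a s : Int) :
    xs.foldl (fun (p : Int × Int) k => (k, p.2 + k)) (a, s) = (xs.getLastD a, s + xs.sum) := by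
  induction xs generalizing a s with
  | nil => simp
  | cons x xs ih =>
    rw [List.foldl_cons, ih, List.getLastD_cons, List.sum_cons, add_assoc]

-- Pair-fold of A's product loop: last loop variable and accumulated product.
theorem pvPairFoldMul (xs : List Int) (a s : Int) :
    xs.foldl (fun (p : Int × Int) k => (k, p.2 * k)) (a, s) = (xs.getLastD a, s * xs.prod) := by
  induction xs generalizing a s with
  | nil => simp
  | cons x xs ih =>
    rw [List.foldl_cons, ih, List.getLastD_cons, List.prod_cons, mul_assoc]

theorem pvRangeLast (n : Int) (a : Int) (h : 1 ≤ n) :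
    (PySem.List.pyRange 1 (n + 1)).getLastD a = n := by
  rw [PySem.List.pyRange_one_succ_right h]
  simp

theorem pvRangeSum (n : Nat) :
    (PySem.List.pyRange 1 ((n : Int) + 1)).sum = (n : Int) * ((n : Int) + 1) / 2 := by
  induction n with
  | zero => decide
  | succ n ih =>
    have h : (1 : Int) ≤ (n : Int) + 1 := by omega
    push_cast
    rw [show ((n : Int) + 1 + 1) = ((n : Int) + 1) + 1 by ring,
        PySem.List.pyRange_one_succ_right h, List.sum_append, ih]
    have hx : ((n : Int) + 1) * ((n : Int) + 1 + 1) = (n : Int) * ((n : Int) + 1) + 2 * ((n : Int) + 1) := by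
      ring
    simp only [List.sum_cons, List.sum_nil, add_zero]
    omega

theorem pvProdRange_eq (lo hi : Int) :
    pvProdRange lo hi = (PySem.List.pyRange lo (hi + 1)).prod := by
  generalize hgen : (hi - lo).toNat = n
  induction n using Nat.strong_induction_on generalizing lo hi with
  | _ n ih =>
    rw [pvProdRange]
    by_cases hgt : lo > hi
    · rw [if_pos hgt, PySem.List.pyRange_one_eq_nil (by omega : hi + 1 ≤ lo)]
      simp
    · rw [if_neg hgt]
      by_cases heq : lo = hi
      · subst heq
        rw [if_pos rfl, PySem.List.pyRange_one_succ_right (le_refl lo),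
            PySem.List.pyRange_one_eq_nil (le_refl lo)]
        simp
      · rw [if_neg heq]
        have hle : lo ≤ hi := by omega
        have hb := PySem.Int.floordiv_two_mid_bounds hle
        have hlt : PySem.Int.floordiv (lo + hi) 2 < hi := by
          rw [PySem.Int.floordiv_lt_iff_lt_mul (by omega)]
          omega
        set mid := PySem.Int.floordiv (lo + hi) 2 with hm
        show pvProdRange lo mid * pvProdRange (mid + 1) hi = _
        rw [ih (mid - lo).toNat (by omega) lo mid rfl,
            ih (hi - (mid + 1)).toNat (by omega) (mid + 1) hi rfl,
            ← List.prod_append,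
            ← PySem.List.pyRange_one_append lo (mid + 1) (hi + 1) (by omega) (by omega)]

-- ===== VERDICT (by name: the statement is the Claim_ definition above) =====
theorem sum_or_product_spec : Claim_equal_sum_or_product := by
  intro number determine_s_p _
  unfold Spec_sum_or_product sum_or_product sum_or_product_alt
  by_cases h0 : number ≤ 0
  · rw [if_pos h0, if_pos h0]
  · have h1 : 1 ≤ number := by omega
    rw [if_neg h0, if_neg h0]
    by_cases hs : (determine_s_p == "s") = true
    · rw [if_pos hs, if_pos hs]
      simp only [pvPairFoldAdd, pvRangeLast number number h1]
      have hn : ((number.toNat : Int)) = number := Int.toNat_of_nonneg (by omega)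
      rw [PySem.Int.floordiv_eq_ediv_of_pos (by omega : (0:Int) < 2), ← hn,
        pvRangeSum number.toNat, zero_add]
    · rw [if_neg hs, if_neg hs]
      by_cases hp : (determine_s_p == "p") = true
      · rw [if_pos hp, if_pos hp]
        simp only [pvPairFoldMul, pvRangeLast number number h1, pvProdRange_eq, one_mul]
      · rw [if_neg hp, if_neg hp]
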